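-- pv_equiv track=rewrite | github.com/amansheaven/pyoracc | pyoracc/tools/grammar_check.py | is_nested_bracket
-- ===== SOURCE A (Python) =====
-- def is_nested_bracket(line):
--     '''
--     :params line: str, the line for checking
--     :return: bool, if there are nested brackets return True else return False
--
--     find if a line contains nested brackets
--     '''
--     stack=[]
--     l_brackets={'{','('} #,'<'
--     r_brackets={')','}'} # '>',
--     for i in line:
--         if (i in l_brackets) and len(set(stack).intersection(l_brackets))>0:
--             return True
--         if (len(stack)>0):
--             if (i in r_brackets) and ((i=='}' and stack[-1]=='{') or (i==')' and stack[-1]=='(')):#(i=='>' and stack[-1]=='<') or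
--                 stack.pop()
--             elif (i in r_brackets) or (i in l_brackets):
--                 stack.append(i)
--         elif (i in r_brackets) or (i in l_brackets):
--             stack.append(i)
--     return False
-- ===== SOURCE B (Python) =====
-- def is_nested_bracket(line):
--     '''
--     :params line: str, the line for checking
--     :return: bool, if there are nested brackets return True else return False
--
--     find if a line contains nested brackets
--     '''
--     # Constant state instead of a stack: A's stack can hold at most one left
--     # bracket (a second one triggers True), and right brackets once pushed are
--     # never popped, so only the pending left bracket and whether it is still on
--     # top of the stack matter.
--     pending = None   # the single unmatched left bracket, if any
--     on_top = False   # True while that left bracket is the top of A's stack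
--     for c in line:
--         if c == '(' or c == '{':
--             if pending is not None:
--                 return True
--             pending, on_top = c, True
--         elif c == ')' or c == '}':
--             if on_top and c == (')' if pending == '(' else '}'):
--                 pending, on_top = None, False
--             else:
--                 on_top = False
--     return False
-- ===== Notes on version B (the rewrite author's own statement) =====
-- stated objective: alternative
-- what changed: Replaced the stack (with a set-intersection rescan of it at every left bracket) by O(1) state: the single pending left bracket and a flag saying whether it is still on top, exploiting that A's stack never holds two left brackets and never pops a right one; asymptotically O(n) vs A's O(n*stack), but not measurably faster on the generated inputs (their stacks stay small).
import Mathlib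
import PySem

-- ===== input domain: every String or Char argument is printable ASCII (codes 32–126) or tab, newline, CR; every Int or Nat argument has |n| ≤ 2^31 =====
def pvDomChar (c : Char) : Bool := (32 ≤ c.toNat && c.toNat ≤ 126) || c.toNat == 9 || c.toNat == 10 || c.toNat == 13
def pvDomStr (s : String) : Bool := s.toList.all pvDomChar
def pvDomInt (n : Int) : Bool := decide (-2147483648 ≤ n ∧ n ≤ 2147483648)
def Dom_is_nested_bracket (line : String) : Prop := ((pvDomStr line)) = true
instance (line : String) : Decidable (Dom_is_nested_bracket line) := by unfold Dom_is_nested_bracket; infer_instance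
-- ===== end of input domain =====

-- B replaces A's stack (rescanned with a set intersection at every left bracket) by O(1) state:
-- the single pending left bracket and whether it is still on top (objective: alternative algorithm).

-- ===== PORT A =====
def pvLeftBr : PySem.Set Char := PySem.Set.ofList ['{', '(']
def pvRightBr : PySem.Set Char := PySem.Set.ofList [')', '}']

-- stack top kept at the HEAD of the list (Python's stack[-1]/pop()/append() act on the list end)
def pvLoopA : List Char → List Char → Bool
  | [], _ => false
  | i :: rest, stack =>
    if (i ∈ pvLeftBr) ∧ PySem.Set.len ((PySem.Set.ofList stack).inter pvLeftBr) > 0 then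
      true
    else if stack.length > 0 then
      if (i ∈ pvRightBr) ∧ ((i = '}' ∧ stack.head? = some '{') ∨ (i = ')' ∧ stack.head? = some '(')) then
        pvLoopA rest stack.tail
      else if (i ∈ pvRightBr) ∨ (i ∈ pvLeftBr) then
        pvLoopA rest (i :: stack)
      else
        pvLoopA rest stack
    else if (i ∈ pvRightBr) ∨ (i ∈ pvLeftBr) then
      pvLoopA rest (i :: stack)
    else
      pvLoopA rest stack

def is_nested_bracket (line : String) : Bool := pvLoopA line.toList []

-- ===== PORT B =====
def pvLoopB : List Char → Option Char → Bool → Bool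
  | [], _, _ => false
  | c :: rest, pending, onTop =>
    if c = '(' ∨ c = '{' then
      if pending.isSome then true
      else pvLoopB rest (some c) true
    else if c = ')' ∨ c = '}' then
      if onTop = true ∧ c = (if pending = some '(' then ')' else '}') then
        pvLoopB rest none false
      else
        pvLoopB rest pending false
    else
      pvLoopB rest pending onTop

def is_nested_bracket_alt (line : String) : Bool := pvLoopB line.toList none false

-- ===== PRECONDITION & SPEC =====
def Spec_is_nested_bracket (line : String) (out : Bool) : Prop := out = is_nested_bracket_alt line
instance (line : String) (out : Bool) : Decidable (Spec_is_nested_bracket line out) := by unfold Spec_is_nested_bracket; infer_instance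

-- ===== CLAIM (what is proved, stated in full; the proofs are below) =====
def Claim_equal_is_nested_bracket : Prop := ∀ (line : String), Dom_is_nested_bracket line → Spec_is_nested_bracket line (is_nested_bracket line)

-- ===== LEMMAS AND PROOFS =====
def pvIsLeft (y : Char) : Bool := y == '{' || y == '('

lemma pvLeftBr_eq : pvLeftBr = ['{', '('] := by decide
lemma pvRightBr_eq : pvRightBr = [')', '}'] := by decide

lemma mem_leftBr (c : Char) : c ∈ pvLeftBr ↔ (c = '{' ∨ c = '(') := by
  rw [pvLeftBr_eq]; simp

lemma mem_rightBr (c : Char) : c ∈ pvRightBr ↔ (c = ')' ∨ c = '}') := by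
  rw [pvRightBr_eq]; simp

lemma interPos (stack : List Char) :
    PySem.Set.len ((PySem.Set.ofList stack).inter pvLeftBr) > 0 ↔
      ∃ y ∈ stack, (y = '{' ∨ y = '(') := by
  rw [PySem.Set.len, gt_iff_lt, Int.natCast_pos, List.length_pos_iff_exists_mem]
  constructor
  · rintro ⟨y, hy⟩
    rw [PySem.Set.mem_inter] at hy
    exact ⟨y, (PySem.Set.mem_ofList _ _).1 hy.1, (mem_leftBr y).1 hy.2⟩
  · rintro ⟨y, hy, hl⟩
    exact ⟨y, (PySem.Set.mem_inter _ _ _).2 ⟨(PySem.Set.mem_ofList _ _).2 hy, (mem_leftBr y).2 hl⟩⟩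

lemma head_not_left_of_filter_nil {t : List Char} (h : t.filter pvIsLeft = []) :
    t.head?.elim false pvIsLeft = false := by
  cases t with
  | nil => rfl
  | cons y ys =>
    simp only [List.head?_cons, Option.elim]
    by_contra hy
    have hy' : pvIsLeft y = true := by revert hy; cases pvIsLeft y <;> simp
    have : y ∈ List.filter pvIsLeft (y :: ys) := by simp [List.mem_filter, hy']
    rw [h] at this
    exact absurd this (List.not_mem_nil)

lemma pvLoop_eq (cs : List Char) : ∀ (stack : List Char) (pending : Option Char) (onTop : Bool),
    stack.filter pvIsLeft = pending.toList →
    onTop = stack.head?.elim false pvIsLeft →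
    pvLoopA cs stack = pvLoopB cs pending onTop := by
  induction cs with
  | nil => intro stack pending onTop _ _; rfl
  | cons c rest ih =>
    intro stack pending onTop hf ht
    by_cases hL : c = '(' ∨ c = '{'
    · -- c is a left bracket
      have hcl : c ∈ pvLeftBr := (mem_leftBr c).2 hL.symm
      have hcr : ¬ c ∈ pvRightBr := by
        rw [mem_rightBr]; rcases hL with h | h <;> simp [h]
      have hil : pvIsLeft c = true := by
        rcases hL with h | h <;> simp [pvIsLeft, h]
      cases pending with
      | some p =>
        -- A returns True via the intersection test; B via pending.isSome
        have hp : p ∈ stack ∧ (p = '{' ∨ p = '(') := by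
          have : p ∈ stack.filter pvIsLeft := by rw [hf]; simp
          rw [List.mem_filter] at this
          refine ⟨this.1, ?_⟩
          have := this.2
          simp only [pvIsLeft, Bool.or_eq_true, beq_iff_eq] at this
          exact this
        have hpos : PySem.Set.len ((PySem.Set.ofList stack).inter pvLeftBr) > 0 :=
          (interPos stack).2 ⟨p, hp.1, hp.2⟩
        rw [pvLoopA, if_pos ⟨hcl, hpos⟩, pvLoopB, if_pos hL]
        simp
      | none =>
        -- no pending left: A pushes c, B records it
        have hnopos : ¬ ((c ∈ pvLeftBr) ∧ PySem.Set.len ((PySem.Set.ofList stack).inter pvLeftBr) > 0) := by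
          rintro ⟨-, hpos⟩
          rcases (interPos stack).1 hpos with ⟨y, hy, hyl⟩
          have : y ∈ stack.filter pvIsLeft := by
            rw [List.mem_filter]
            exact ⟨hy, by rcases hyl with h | h <;> simp [pvIsLeft, h]⟩
          rw [hf] at this
          exact absurd this (List.not_mem_nil)
        have hrec : pvLoopA rest (c :: stack) = pvLoopB rest (some c) true := by
          apply ih
          · simp [hil, hf]
          · simp [hil]
        rw [pvLoopA, if_neg hnopos, pvLoopB, if_pos hL]
        simp only [Option.isSome_none, Bool.false_eq_true, if_false]
        by_cases hs : stack.length > 0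
        · rw [if_pos hs, if_neg (by rintro ⟨h, -⟩; exact hcr h), if_pos (Or.inr hcl), hrec]
        · rw [if_neg hs, if_pos (Or.inr hcl), hrec]
    · by_cases hR : c = ')' ∨ c = '}'
      · -- c is a right bracket
        have hcl : ¬ c ∈ pvLeftBr := by
          rw [mem_leftBr]; rintro (h | h) <;> exact hL (by simp [h])
        have hcr : c ∈ pvRightBr := (mem_rightBr c).2 hR
        have hil : pvIsLeft c = false := by
          simp only [pvIsLeft, Bool.or_eq_false_iff, beq_eq_false_iff_ne]
          exact ⟨fun h => hL (Or.inr h), fun h => hL (Or.inl h)⟩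
        rw [pvLoopA, if_neg (by rintro ⟨h, -⟩; exact hcl h),
            pvLoopB, if_neg hL, if_pos hR]
        cases stack with
        | nil =>
          -- empty stack: A pushes c; B: onTop = false so no pop
          have ht' : onTop = false := by simpa using ht
          rw [ht']
          rw [if_neg (by simp), if_pos (Or.inl hcr)]
          simp only [Bool.false_eq_true, false_and, if_false]
          apply ih
          · simpa [List.filter_cons, hil] using hf
          · simp [hil]
        | cons h0 t =>
          by_cases hTop : pvIsLeft h0 = true
          · -- top of stack is a left bracket: it is the pending one
            have hfs : h0 :: t.filter pvIsLeft = pending.toList := by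
              simpa [List.filter_cons, hTop] using hf
            have hpend : pending = some h0 ∧ t.filter pvIsLeft = [] := by
              cases pending with
              | none => simp at hfs
              | some p =>
                simp only [Option.toList_some] at hfs
                exact ⟨by rw [List.cons_eq_cons] at hfs; rw [hfs.1], by
                  rw [List.cons_eq_cons] at hfs; exact hfs.2⟩
            have ht' : onTop = true := by simpa [hTop] using ht
            have hh0 : h0 = '{' ∨ h0 = '(' := by
              simp only [pvIsLeft, Bool.or_eq_true, beq_iff_eq] at hTop; exact hTop
            -- A's pop condition ↔ B's pop condition
            have hcond : ((c = '}' ∧ (h0 :: t).head? = some '{') ∨ (c = ')' ∧ (h0 :: t).head? = some '(')) ↔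
                (c = (if pending = some '(' then ')' else '}')) := by
              rw [hpend.1]
              rcases hh0 with h | h <;> subst h
              · rw [if_neg (by decide)]
                simp only [List.head?_cons, Option.some.injEq]
                constructor
                · rintro (⟨h1, -⟩ | ⟨-, h2⟩)
                  · exact h1
                  · exact absurd h2 (by decide)
                · intro h1; exact Or.inl ⟨h1, trivial⟩
              · rw [if_pos rfl]
                simp only [List.head?_cons, Option.some.injEq]
                constructor
                · rintro (⟨-, h2⟩ | ⟨h1, -⟩)
                  · exact absurd h2 (by decide)
                  · exact h1
                · intro h1; exact Or.inr ⟨h1, trivial⟩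
            by_cases hmatch : c = (if pending = some '(' then ')' else '}')
            · -- pop
              rw [if_pos (by simp), if_pos ⟨hcr, hcond.2 hmatch⟩, if_pos ⟨ht', hmatch⟩]
              apply ih
              · simp [hpend.2]
              · exact (head_not_left_of_filter_nil hpend.2).symm
            · -- push the right bracket
              rw [if_pos (by simp), if_neg (by rintro ⟨-, h⟩; exact hmatch (hcond.1 h)),
                  if_pos (Or.inl hcr), if_neg (by rintro ⟨-, h⟩; exact hmatch h)]
              apply ih
              · simpa [List.filter_cons, hil] using hf
              · simp [hil]
          · -- top is not a left bracket: no pop possible on either side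
            have ht' : onTop = false := by
              rw [ht]; simp only [List.head?_cons, Option.elim]
              revert hTop; cases pvIsLeft h0 <;> simp
            have hnopop : ¬ ((c ∈ pvRightBr) ∧ ((c = '}' ∧ (h0 :: t).head? = some '{') ∨ (c = ')' ∧ (h0 :: t).head? = some '('))) := by
              rintro ⟨-, (⟨-, h2⟩ | ⟨-, h2⟩)⟩ <;>
                · simp only [List.head?_cons, Option.some.injEq] at h2
                  subst h2
                  exact hTop (by decide)
            rw [if_pos (by simp), if_neg hnopop, if_pos (Or.inl hcr),
                if_neg (by rintro ⟨h, -⟩; rw [ht'] at h; exact absurd h (by decide))]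
            apply ih
            · simpa [List.filter_cons, hil] using hf
            · simp [hil]
      · -- c is not a bracket: both sides skip it
        have hcl : ¬ c ∈ pvLeftBr := by
          rw [mem_leftBr]; rintro (h | h) <;> exact hL (by simp [h])
        have hcr : ¬ c ∈ pvRightBr := by
          rw [mem_rightBr]; rintro (h | h) <;> exact hR (by simp [h])
        rw [pvLoopA, if_neg (by rintro ⟨h, -⟩; exact hcl h),
            pvLoopB, if_neg hL, if_neg hR]
        by_cases hs : stack.length > 0
        · rw [if_pos hs, if_neg (by rintro ⟨h, -⟩; exact hcr h),
              if_neg (by rintro (h | h); exacts [hcr h, hcl h])]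
          exact ih stack pending onTop hf ht
        · rw [if_neg hs, if_neg (by rintro (h | h); exacts [hcr h, hcl h])]
          exact ih stack pending onTop hf ht

-- ===== VERDICT (by name: the statement is the Claim_ definition above) =====
theorem is_nested_bracket_spec : Claim_equal_is_nested_bracket := by
  intro line _
  unfold Spec_is_nested_bracket is_nested_bracket is_nested_bracket_alt
  exact pvLoop_eq line.toList [] none false rfl rfl
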